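-- pv_equiv track=rewrite | github.com/oscarpitcho/baseformer | baseformer/tokenization/utils.py | apply_merge
-- ===== SOURCE A (Python) =====
-- from typing import Dict, List, Tuple, TYPE_CHECKING
--
-- def apply_merge(seq: List[int],
--                 pair: Tuple[int, int],
--                 new_token_idx: int
--                 ) -> Tuple[List[int], List[Tuple[int]]]:
--     """Substitutes all occurences of the pair in the input sequence with the new token idx.
--     If the pair is not present then returns seq unchanged
--
--     Returns:
--         new_sequence - List with the new token substituted in
--
--         positive_pairs - List of (potentially repeating), new adjacent pairs introduced.
--                          Pairs are uniquely identified by the left most index."""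
--     new_seq = []
--     positive_pairs =[]
--     i = 0
--     new_seq_idx = -1
--     while i < len(seq):
--         # If we are not at the last element and we found the pair
--         if (i < len(seq) - 1) and (seq[i] == pair[0]) and (seq[i+1] == pair[1]):
--             new_seq.append(new_token_idx)
--             i += 2  # Skip both elements of the pair
--         else:
--             new_seq.append(seq[i])
--             i += 1
--         new_seq_idx += 1
--
--         # Add positive pairs
--         if new_seq_idx > 0:
--             if ((new_seq[new_seq_idx - 1] == new_token_idx)
--                  or (new_seq[new_seq_idx] == new_token_idx)):
--                  positive_pairs.append((new_seq[new_seq_idx - 1], new_seq[new_seq_idx]))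
--
--     return new_seq, positive_pairs
-- ===== SOURCE B (Python) =====
-- def apply_merge(seq, pair, new_token_idx):
--     """Greedy match positions first, then rebuild new_seq from slices between
--     the matches, then derive positive_pairs by zip-filtering consecutive
--     elements of the rebuilt sequence."""
--     matches = []
--     i = 0
--     n = len(seq)
--     while i < n - 1:
--         if seq[i] == pair[0] and seq[i + 1] == pair[1]:
--             matches.append(i)
--             i += 2
--         else:
--             i += 1
--     new_seq = []
--     prev = 0
--     for m in matches:
--         new_seq.extend(seq[prev:m])
--         new_seq.append(new_token_idx)
--         prev = m + 2
--     new_seq.extend(seq[prev:])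
--     positive_pairs = [(x, y) for x, y in zip(new_seq, new_seq[1:])
--                       if x == new_token_idx or y == new_token_idx]
--     return new_seq, positive_pairs
-- ===== Notes on version B (the rewrite author's own statement) =====
-- stated objective: alternative
-- what changed: A fuses merging and new-pair emission in one index-driven while-loop; B instead collects the greedy non-overlapping match positions into a list, reconstructs new_seq from the slices of seq between those positions (bulk extend instead of per-element append), and derives positive_pairs by zip-filtering consecutive elements of the rebuilt sequence.
import Mathlib
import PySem

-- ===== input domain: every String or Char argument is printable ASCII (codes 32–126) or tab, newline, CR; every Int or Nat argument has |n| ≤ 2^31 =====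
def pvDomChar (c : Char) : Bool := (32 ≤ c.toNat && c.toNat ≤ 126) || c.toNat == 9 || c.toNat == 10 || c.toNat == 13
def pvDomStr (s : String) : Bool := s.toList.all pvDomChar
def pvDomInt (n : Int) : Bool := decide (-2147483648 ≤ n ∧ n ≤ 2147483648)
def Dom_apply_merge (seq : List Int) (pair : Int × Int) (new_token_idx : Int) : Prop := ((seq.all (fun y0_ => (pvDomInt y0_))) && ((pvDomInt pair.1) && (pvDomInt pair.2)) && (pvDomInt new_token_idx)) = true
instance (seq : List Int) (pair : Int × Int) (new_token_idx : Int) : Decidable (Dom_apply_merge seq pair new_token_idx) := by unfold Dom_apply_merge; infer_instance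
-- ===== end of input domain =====

-- B replaces A's fused loop by three stages — greedy match positions, slice
-- reconstruction, zip-filter of consecutive pairs (objective: alternative).


-- ===== PORT A =====
-- A's single while-loop: fused merging and pair emission; new_seq kept reversed
-- in the accumulator `ns` (Python appends at the end), reversed once on exit.
-- The "new_seq_idx > 0" guard is the `ns` non-emptiness match; the emitted pair
-- is (last element of new_seq before this append, element appended now).
def applyMergeLoop (p1 p2 t : Int) (seq : List Int) (ns : List Int)
    (pp : List (Int × Int)) : List Int × (List (Int × Int)) :=
  match seq with
  | [] => (ns.reverse, pp)
  | a :: b :: rest2 =>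
    if a = p1 ∧ b = p2 then
      let pp' := match ns with
        | prev :: _ => if prev = t ∨ t = t then pp ++ [(prev, t)] else pp
        | [] => pp
      applyMergeLoop p1 p2 t rest2 (t :: ns) pp'
    else
      let pp' := match ns with
        | prev :: _ => if prev = t ∨ a = t then pp ++ [(prev, a)] else pp
        | [] => pp
      applyMergeLoop p1 p2 t (b :: rest2) (a :: ns) pp'
  | [a] =>
    let pp' := match ns with
      | prev :: _ => if prev = t ∨ a = t then pp ++ [(prev, a)] else pp
      | [] => pp
    ((a :: ns).reverse, pp')
termination_by seq.length
decreasing_by all_goals (simp only [List.length_cons]; omega)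

def apply_merge (seq : List Int) (pair : Int × Int) (new_token_idx : Int) :
    List Int × (List (Int × Int)) :=
  applyMergeLoop pair.1 pair.2 new_token_idx seq [] []

-- ===== PORT B =====
-- B stage 1: the while-loop collecting greedy non-overlapping match positions
-- (i walks the list; the list argument is seq viewed from position i).
def matchPos (p1 p2 : Int) (i : Nat) : List Int → List Nat
  | a :: b :: rest2 =>
    if a = p1 ∧ b = p2 then i :: matchPos p1 p2 (i + 2) rest2
    else matchPos p1 p2 (i + 1) (b :: rest2)
  | _ => []
termination_by l => l.length
decreasing_by all_goals (simp only [List.length_cons]; omega)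

-- B stage 2: rebuild new_seq from the slices of seq between the matches.
-- Python's seq[prev:m] / seq[prev:] for 0 ≤ prev ≤ m ≤ len(seq) are exactly
-- (seq.drop prev).take (m - prev) and seq.drop prev (comment: exact on the
-- in-range nonnegative indices stage 1 produces).
def rebuild (t : Int) (seq : List Int) : List Nat → Nat → List Int
  | [], prev => seq.drop prev
  | m :: ms, prev => (seq.drop prev).take (m - prev) ++ [t] ++ rebuild t seq ms (m + 2)

def apply_merge_alt (seq : List Int) (pair : Int × Int) (new_token_idx : Int) :
    List Int × (List (Int × Int)) :=
  let new_seq := rebuild new_token_idx seq (matchPos pair.1 pair.2 0 seq) 0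
  -- B stage 3: zip(new_seq, new_seq[1:]) filtered on containing the new token.
  (new_seq,
   (new_seq.zip (new_seq.drop 1)).filter
     (fun p => p.1 == new_token_idx || p.2 == new_token_idx))

-- ===== PRECONDITION & SPEC =====
def Spec_apply_merge (seq : List Int) (pair : Int × Int) (new_token_idx : Int) (out : List Int × (List (Int × Int))) : Prop := out = apply_merge_alt seq pair new_token_idx
instance (seq : List Int) (pair : Int × Int) (new_token_idx : Int) (out : List Int × (List (Int × Int))) : Decidable (Spec_apply_merge seq pair new_token_idx out) := by unfold Spec_apply_merge; infer_instance

-- ===== CLAIM (what is proved, stated in full; the proofs are below) =====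
def Claim_equal_apply_merge : Prop := ∀ (seq : List Int) (pair : Int × Int) (new_token_idx : Int), Dom_apply_merge seq pair new_token_idx → Spec_apply_merge seq pair new_token_idx (apply_merge seq pair new_token_idx)

-- ===== LEMMAS AND PROOFS =====

-- Proof-only middle form: the merged sequence as a direct recursion.
def mergePass (p1 p2 t : Int) : List Int → List Int
  | [] => []
  | a :: b :: rest2 =>
    if a = p1 ∧ b = p2 then t :: mergePass p1 p2 t rest2
    else a :: mergePass p1 p2 t (b :: rest2)
  | [a] => [a]
termination_by l => l.length
decreasing_by all_goals (simp only [List.length_cons]; omega)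

-- Proof-only middle form: consecutive pairs of the merged sequence containing t.
def pairScan (t : Int) : List Int → List (Int × Int)
  | a :: b :: rest =>
    (if a = t ∨ b = t then [(a, b)] else []) ++ pairScan t (b :: rest)
  | _ => []

-- pair emission of A, as a function of the previous new_seq element (if any)
-- and the stream of elements still to be appended.
def emitPairs (t : Int) : Option Int → List Int → List (Int × Int)
  | _, [] => []
  | none, x :: rest => emitPairs t (some x) rest
  | some p, x :: rest =>
    (if p = t ∨ x = t then [(p, x)] else []) ++ emitPairs t (some x) rest

theorem emitPairs_some_eq_pairScan (t prev : Int) (l : List Int) :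
    emitPairs t (some prev) l = pairScan t (prev :: l) := by
  induction l generalizing prev with
  | nil => simp [emitPairs, pairScan]
  | cons x rest ih => simp [emitPairs, pairScan, ih]

theorem emitPairs_none_eq_pairScan (t : Int) (l : List Int) :
    emitPairs t none l = pairScan t l := by
  cases l with
  | nil => simp [emitPairs, pairScan]
  | cons x rest => simp [emitPairs, emitPairs_some_eq_pairScan]

theorem applyMergeLoop_eq (p1 p2 t : Int) (seq ns : List Int)
    (pp : List (Int × Int)) :
    applyMergeLoop p1 p2 t seq ns pp =
      (ns.reverse ++ mergePass p1 p2 t seq,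
       pp ++ emitPairs t ns.head? (mergePass p1 p2 t seq)) := by
  fun_induction applyMergeLoop p1 p2 t seq ns pp with
  | case1 ns pp => simp [mergePass, emitPairs]
  | case2 ns pp a b rest2 h pp' ih =>
    rw [ih]
    cases ns with
    | nil => simp [mergePass, h, emitPairs, pp']
    | cons prev ns' => simp [mergePass, h, emitPairs, pp']
  | case3 ns pp a b rest2 h pp' ih =>
    rw [ih]
    cases ns with
    | nil => simp [mergePass, h, emitPairs, pp']
    | cons prev ns' =>
      by_cases hc : prev = t ∨ a = t <;>
        simp [mergePass, h, emitPairs, pp', hc]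
  | case4 ns pp a pp' =>
    cases ns with
    | nil => simp [mergePass, emitPairs, pp']
    | cons prev ns' =>
      by_cases hc : prev = t ∨ a = t <;>
        simp [mergePass, emitPairs, pp', hc]

-- Every position matchPos emits lies at or after the index it starts from.
theorem matchPos_ge (p1 p2 : Int) (i : Nat) (l : List Int) :
    ∀ m ∈ matchPos p1 p2 i l, i ≤ m := by
  match l with
  | [] => simp [matchPos]
  | [a] => simp [matchPos]
  | a :: b :: rest2 =>
    by_cases h : a = p1 ∧ b = p2
    · rw [matchPos, if_pos h]
      intro m hm
      rcases List.mem_cons.mp hm with rfl | hm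
      · exact le_refl _
      · exact le_trans (by omega) (matchPos_ge p1 p2 (i + 2) rest2 m hm)
    · rw [matchPos, if_neg h]
      intro m hm
      exact le_trans (by omega) (matchPos_ge p1 p2 (i + 1) (b :: rest2) m hm)
termination_by l.length
decreasing_by all_goals (simp only [List.length_cons]; omega)

-- Peeling one unmatched element off the front of a rebuild.
theorem rebuild_cons (t : Int) (seq : List Int) (ms : List Nat) (i : Nat)
    (a : Int) (ha : seq.drop i = a :: seq.drop (i + 1))
    (hms : ∀ m ∈ ms, i + 1 ≤ m) :
    rebuild t seq ms i = a :: rebuild t seq ms (i + 1) := by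
  cases ms with
  | nil => simp [rebuild, ha]
  | cons m ms' =>
    have hm : i + 1 ≤ m := hms m (by simp)
    have : (seq.drop i).take (m - i) = a :: (seq.drop (i + 1)).take (m - (i + 1)) := by
      rw [ha]
      have : m - i = (m - (i + 1)) + 1 := by omega
      rw [this, List.take_succ_cons]
    simp [rebuild, this]

-- The rebuilt sequence equals the merged sequence (generalized over the
-- starting index, with the tail argument being seq viewed from there).
theorem rebuild_matchPos (p1 p2 t : Int) (seq : List Int) (l : List Int) (i : Nat)
    (hl : l = seq.drop i) :
    rebuild t seq (matchPos p1 p2 i l) i = mergePass p1 p2 t l := by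
  match l, hl with
  | [], hl => simp [matchPos, rebuild, mergePass, ← hl]
  | [a], hl => simp [matchPos, rebuild, mergePass, ← hl]
  | a :: b :: rest2, hl =>
    have h1 : seq.drop (i + 1) = b :: rest2 := by
      have := (List.tail_drop (l := seq) (i := i)).symm
      rw [← hl] at this
      simpa using this
    by_cases h : a = p1 ∧ b = p2
    · have hdrop : seq.drop (i + 2) = rest2 := by
        have := (List.tail_drop (l := seq) (i := i + 1)).symm
        rw [h1] at this
        simpa using this
      rw [matchPos, if_pos h, mergePass, if_pos h, rebuild]
      simp only [Nat.sub_self, List.take_zero, List.nil_append]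
      rw [rebuild_matchPos p1 p2 t seq rest2 (i + 2) hdrop.symm]
      simp
    · rw [matchPos, if_neg h, mergePass, if_neg h]
      rw [rebuild_cons t seq _ i a (by rw [← hl, h1])
        (matchPos_ge p1 p2 (i + 1) (b :: rest2))]
      rw [rebuild_matchPos p1 p2 t seq (b :: rest2) (i + 1) h1.symm]
termination_by l.length
decreasing_by all_goals (simp only [List.length_cons]; omega)

-- The zip-filter of stage 3 equals the pair scan.
theorem zip_filter_eq_pairScan (t : Int) (l : List Int) :
    (l.zip l.tail).filter (fun p => p.1 == t || p.2 == t) = pairScan t l := by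
  induction l with
  | nil => simp [pairScan]
  | cons a l ih =>
    cases l with
    | nil => simp [pairScan]
    | cons b rest =>
      by_cases hc : a = t ∨ b = t
      · simp only [pairScan, if_pos hc]
        have : (a == t || b == t) = true := by
          rcases hc with rfl | rfl <;> simp
        simp [this, ← ih]
      · simp only [pairScan, if_neg hc]
        have : (a == t || b == t) = false := by
          rw [not_or] at hc
          simp [hc.1, hc.2]
        simp [this, ← ih]

-- ===== VERDICT (by name: the statement is the Claim_ definition above) =====
theorem apply_merge_spec : Claim_equal_apply_merge := by
  intro seq pair t _
  unfold Spec_apply_merge apply_merge apply_merge_alt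
  rw [applyMergeLoop_eq]
  rw [rebuild_matchPos pair.1 pair.2 t seq seq 0 (by simp)]
  simp [emitPairs_none_eq_pairScan]
  exact (zip_filter_eq_pairScan t _).symm
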